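-- pv_equiv track=rewrite | github.com/joyhwang41/Netflix-Website-Optimization-Using-A-B-Testing | utils.py | interaction_combinations
-- ===== SOURCE A (Python) =====
-- def interaction_combinations(cols):
--     combinations = []
--     for _ in range(len(cols)):
--         target = cols.pop()
--         for val in cols:
--             combinations.append([target, val])
--         cols.insert(0, target)
--     return combinations
-- ===== SOURCE B (Python) =====
-- def interaction_combinations(cols):
--     n = len(cols)
--     return [[cols[i], v]
--             for i in reversed(range(n))
--             for v in cols[i + 1:] + cols[:i]]
-- ===== Notes on version B (the rewrite author's own statement) =====
-- stated objective: simpler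
-- what changed: Replaces A's repeated pop/insert mutation of cols with a single comprehension over indices in reverse, taking the cyclically-following values as the slice concatenation cols[i+1:]+cols[:i].
import Mathlib
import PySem

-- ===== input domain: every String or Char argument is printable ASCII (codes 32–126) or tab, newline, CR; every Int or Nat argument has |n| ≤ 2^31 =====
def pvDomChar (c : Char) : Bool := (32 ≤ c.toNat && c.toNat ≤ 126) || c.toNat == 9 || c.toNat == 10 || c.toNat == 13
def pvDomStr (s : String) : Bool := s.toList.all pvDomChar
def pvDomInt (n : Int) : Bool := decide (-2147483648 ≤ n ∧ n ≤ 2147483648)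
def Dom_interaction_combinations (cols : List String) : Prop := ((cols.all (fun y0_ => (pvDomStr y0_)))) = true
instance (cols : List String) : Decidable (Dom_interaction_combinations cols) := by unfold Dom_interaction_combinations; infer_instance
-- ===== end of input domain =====

-- B replaces A's pop/insert mutation of cols by a comprehension over indices in reverse
-- with slice concatenation cols[i+1:]+cols[:i] (objective: simpler).
-- A mutates cols during the loop but restores it exactly (each iteration is a rotation,
-- n iterations undo it), so there is no observable side-effect difference.

-- ===== PORT A =====
-- the for-loop over range(len(cols)) with mutable state (cols, combinations);
-- cols.pop() is ported by hand as (getLast?, dropLast) — exact: pop on a nonempty list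
-- returns its last element and removes it; pop on [] raises, which never happens here
-- (zero iterations when cols is empty), the `none` branch is an unreachable totality guard.
def icLoop : Nat → List String × List (List String) → List String × List (List String)
  | 0, st => st
  | Nat.succ k, (cs, acc) =>
    match cs.getLast? with
    | none => (cs, acc)
    | some target =>
        icLoop k (target :: cs.dropLast, acc ++ cs.dropLast.map (fun v => [target, v]))

def interaction_combinations (cols : List String) : List (List String) :=
  (icLoop cols.length (cols, [])).2

-- ===== PORT B =====
-- [[cols[i], v] for i in reversed(range(n)) for v in cols[i+1:] + cols[:i]]
def interaction_combinations_alt (cols : List String) : List (List String) :=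
  ((PySem.List.pyRange 0 (cols.length : Int) 1).reverse).flatMap (fun i =>
    (PySem.List.slice cols (some (i + 1)) none ++ PySem.List.slice cols none (some i)).map
      (fun v => [(PySem.List.pyGet? cols i).getD "", v]))

-- ===== PRECONDITION & SPEC =====
def Spec_interaction_combinations (cols : List String) (out : List (List String)) : Prop := out = interaction_combinations_alt cols
instance (cols : List String) (out : List (List String)) : Decidable (Spec_interaction_combinations cols out) := by unfold Spec_interaction_combinations; infer_instance

-- ===== CLAIM (what is proved, stated in full; the proofs are below) =====
def Claim_equal_interaction_combinations : Prop := ∀ (cols : List String), Dom_interaction_combinations cols → Spec_interaction_combinations cols (interaction_combinations cols)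

-- ===== LEMMAS AND PROOFS =====

-- the group of pairs produced for target index k
def icGroup (cols : List String) (k : Nat) : List (List String) :=
  (cols.drop (k + 1) ++ cols.take k).map (fun v => [(cols[k]?).getD "", v])

-- the groups for indices k-1, k-2, …, 0
def icGroups (cols : List String) : Nat → List (List String)
  | 0 => []
  | k + 1 => icGroup cols k ++ icGroups cols k

lemma icLoop_invariant (cols : List String) :
    ∀ (k : Nat), k ≤ cols.length → ∀ (acc : List (List String)),
      (icLoop k (cols.drop k ++ cols.take k, acc)).2 = acc ++ icGroups cols k := by
  intro k
  induction k with
  | zero => intro _ acc; simp [icLoop, icGroups]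
  | succ k ih =>
    intro hk acc
    have hk' : k < cols.length := by omega
    have htake_len : (cols.take (k + 1)).length = k + 1 := by
      simp [List.length_take]; omega
    have htake_ne : cols.take (k + 1) ≠ [] := by
      intro h; rw [h] at htake_len; simp at htake_len
    have hlast : (cols.drop (k + 1) ++ cols.take (k + 1)).getLast? = some cols[k] := by
      rw [List.getLast?_append_of_ne_nil _ htake_ne, List.getLast?_eq_getElem?, htake_len]
      simp [hk']
    have hdropLast : (cols.drop (k + 1) ++ cols.take (k + 1)).dropLast
        = cols.drop (k + 1) ++ cols.take k := by
      rw [List.dropLast_append_of_ne_nil htake_ne, List.dropLast_eq_take, htake_len]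
      simp [List.take_take]
    have hrot : cols[k] :: (cols.drop (k + 1) ++ cols.take k)
        = cols.drop k ++ cols.take k := by
      rw [List.drop_eq_getElem_cons hk']; rfl
    have hgetD : (cols[k]?).getD "" = cols[k] := by
      simp [List.getElem?_eq_getElem hk']
    simp only [icLoop, hlast, hdropLast]
    rw [hrot, ih (by omega)]
    simp [icGroups, icGroup, hgetD, List.append_assoc]

lemma alt_eq_icGroups (cols : List String) :
    interaction_combinations_alt cols = icGroups cols cols.length := by
  unfold interaction_combinations_alt
  rw [PySem.List.pyRange_zero_natCast]
  generalize cols.length = m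
  induction m with
  | zero => simp [icGroups]
  | succ m ih =>
    rw [List.range_succ, List.map_append, List.reverse_append, List.flatMap_append, ih]
    simp only [List.map_cons, List.map_nil, List.reverse_singleton, List.flatMap_cons,
      List.flatMap_nil, List.append_nil]
    simp only [icGroups]
    congr 1
    rw [PySem.List.slice_to_natCast, icGroup]
    have hc : (m : Int) + 1 = ((m + 1 : Nat) : Int) := by push_cast; ring
    rw [hc, PySem.List.slice_from_natCast, PySem.List.pyGet?_natCast]

-- ===== VERDICT (by name: the statement is the Claim_ definition above) =====
theorem interaction_combinations_spec : Claim_equal_interaction_combinations := by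
  intro cols _
  show interaction_combinations cols = interaction_combinations_alt cols
  rw [alt_eq_icGroups]
  unfold interaction_combinations
  have h := icLoop_invariant cols cols.length (le_refl _) []
  simpa using h
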